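-- pv_equiv track=rewrite | github.com/sourcery-ai-experiments/jaar | src/agenda/road.py | get_forefather_roads
-- ===== SOURCE A (Python) =====
-- class RoadNode(str):
--     def is_node(self, delimiter: str = None) -> bool:
--         return self.find(get_node_delimiter(delimiter)) == -1
--
-- class RoadUnit(str):  # Created to help track the concept
--     pass
--
-- def get_node_delimiter(delimiter: str = None) -> str:
--     return delimiter if delimiter != None else ","
--
-- def get_all_road_nodes(road: RoadUnit, delimiter: str = None) -> list[RoadNode]:
--     return road.split(get_node_delimiter(delimiter))
--
-- def get_ancestor_roads(road: RoadUnit) -> list[RoadUnit:None]: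
--     if road is None:
--         return []
--     nodes = get_all_road_nodes(road)
--     temp_road = nodes.pop(0)
--
--     temp_roads = [temp_road]
--     if nodes != []:
--         while nodes != []:
--             temp_road = get_road(temp_road, nodes.pop(0))
--             temp_roads.append(temp_road)
--
--     x_roads = []
--     while temp_roads != []:
--         x_roads.append(temp_roads.pop(len(temp_roads) - 1))
--     return x_roads
--
-- class ForeFatherException(Exception):
--     pass
--
-- def get_forefather_roads(road: RoadUnit) -> dict[RoadUnit]:
--     ancestor_roads = get_ancestor_roads(road=road)
--     popped_road = ancestor_roads.pop(0)
--     if popped_road != road: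
--         raise ForeFatherException(
--             f"Incorrect road {popped_road} removed from forefather_roads"
--         )
--     return {a_road: None for a_road in ancestor_roads}
--
-- def get_road_from_nodes(nodes: list[RoadNode], delimiter: str = None) -> RoadUnit:
--     return get_node_delimiter(delimiter).join(nodes)
--
-- def get_road_from_road_and_node(
--     pad: RoadUnit, terminus_node: RoadNode, delimiter: str = None
-- ) -> RoadUnit:
--     if terminus_node is None:
--         return RoadUnit(pad)
--     else:
--         return RoadUnit(
--             terminus_node
--             if pad in {"", None}
--             else f"{pad}{get_node_delimiter(delimiter)}{terminus_node}"
--         )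
--
-- def get_road(
--     road_begin: RoadUnit = None,
--     terminus_node: RoadNode = None,
--     road_nodes: list[RoadNode] = None,
--     delimiter: str = None,
-- ) -> RoadUnit:
--     x_road = ""
--     if road_begin != None and road_nodes in (None, []):
--         x_road = road_begin
--     if road_begin != None and road_nodes not in (None, []):
--         x_road = get_road(
--             road_begin=road_begin,
--             terminus_node=get_road_from_nodes(road_nodes, delimiter),
--             delimiter=delimiter,
--         )
--     if road_begin is None and road_nodes not in (None, []):
--         x_road = get_road_from_nodes(road_nodes, delimiter=delimiter)
--     if terminus_node != None:
--         x_road = get_road_from_road_and_node(x_road, terminus_node, delimiter=delimiter)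
--     return x_road
-- ===== SOURCE B (Python) =====
-- def get_forefather_roads(road):
--     nodes = road.split(",")
--     return {",".join(nodes[:i]): None for i in range(len(nodes) - 1, 0, -1)}
-- ===== Notes on version B (the rewrite author's own statement) =====
-- stated objective: simpler
-- what changed: B replaces A's recursive get_road/get_ancestor_roads concatenation machinery (build ancestors by repeated pop(0)+concat, reverse by popping from the end, then pop and re-check the full road) with a single dict comprehension over comma-joined slices nodes[:i] for i from len(nodes)-1 down to 1.
-- outside the precondition, e.g. on get_forefather_roads(','): A raises ForeFatherException, B returns {'': None}
import Mathlib
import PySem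

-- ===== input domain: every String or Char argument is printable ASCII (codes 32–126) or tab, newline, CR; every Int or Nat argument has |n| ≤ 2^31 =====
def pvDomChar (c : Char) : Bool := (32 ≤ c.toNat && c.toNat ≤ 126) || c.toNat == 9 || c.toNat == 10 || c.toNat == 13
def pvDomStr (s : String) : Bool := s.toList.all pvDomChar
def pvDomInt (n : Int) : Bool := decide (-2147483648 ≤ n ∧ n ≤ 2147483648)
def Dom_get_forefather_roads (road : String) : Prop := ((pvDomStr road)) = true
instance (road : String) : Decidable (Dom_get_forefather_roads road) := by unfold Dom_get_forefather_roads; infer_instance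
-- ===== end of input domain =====

-- B replaces A's recursive get_road/get_ancestor_roads concatenation-and-reverse machinery by a
-- direct comprehension over slices of the split road (objective: simpler).

-- ===== PORT A =====

def pv_get_node_delimiter (delimiter : Option String) : String :=
  match delimiter with
  | some d => d
  | none => ","

-- split? is none only for sep = ""; every call in A passes delimiter = None, so sep = "," and
-- the .getD [] default is never taken
def pv_get_all_road_nodes (road : String) (delimiter : Option String) : List String :=
  (PySem.Str.split? road (pv_get_node_delimiter delimiter)).getD []

def pv_get_road_from_nodes (nodes : List String) (delimiter : Option String) : String :=
  PySem.Str.join (pv_get_node_delimiter delimiter) nodes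

def pv_get_road_from_road_and_node (pad : String) (terminus_node : Option String)
    (delimiter : Option String) : String :=
  match terminus_node with
  | none => pad
  | some t => if pad = "" then t else pad ++ pv_get_node_delimiter delimiter ++ t

def pv_get_road (road_begin : Option String) (terminus_node : Option String)
    (road_nodes : Option (List String)) (delimiter : Option String) : String :=
  let x0 : String := ""
  let x1 := if road_begin ≠ none ∧ (road_nodes = none ∨ road_nodes = some []) then
      road_begin.getD "" else x0
  let x2 := if _h : road_begin ≠ none ∧ ¬(road_nodes = none ∨ road_nodes = some []) then
      pv_get_road road_begin (some (pv_get_road_from_nodes (road_nodes.getD []) delimiter))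
        none delimiter
    else x1
  let x3 := if road_begin = none ∧ ¬(road_nodes = none ∨ road_nodes = some []) then
      pv_get_road_from_nodes (road_nodes.getD []) delimiter else x2
  if terminus_node ≠ none then pv_get_road_from_road_and_node x3 terminus_node delimiter else x3
termination_by (match road_nodes with | none => 0 | some [] => 0 | some (_ :: _) => 1)
decreasing_by rcases road_nodes with _ | ⟨_ | _⟩ <;> simp_all

-- the 'while nodes != []' loop of get_ancestor_roads (pop(0) each turn, appending to temp_roads)
def pv_anc_loop (temp_road : String) (nodes : List String) : List String :=
  match nodes with
  | [] => []
  | n :: rest =>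
      let t := pv_get_road (some temp_road) (some n) none none
      t :: pv_anc_loop t rest

-- the 'while temp_roads != []' loop (pop the last element, append to x_roads)
def pv_poplast_loop (temp_roads : List String) : List String :=
  if h : temp_roads = [] then []
  else temp_roads.getLast h :: pv_poplast_loop temp_roads.dropLast
termination_by temp_roads.length
decreasing_by
  have : temp_roads.length ≠ 0 := by simpa using h
  simp [List.length_dropLast]; omega

def pv_get_ancestor_roads (road : String) : List String :=
  -- Python's 'if road is None: return []' cannot fire here: road : String is never None
  let nodes := pv_get_all_road_nodes road none
  match nodes with
  | [] => []   -- unreachable: str.split output is never the empty list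
  | temp_road :: rest => pv_poplast_loop (temp_road :: pv_anc_loop temp_road rest)

def get_forefather_roads (road : String) : List (String × Option String) :=
  match pv_get_ancestor_roads road with
  | [] => []   -- Python's pop(0) would raise IndexError here; unreachable for a String road
  | popped_road :: rest =>
      if popped_road ≠ road then []   -- raise ForeFatherException: excluded by Pre_
      else (rest.foldl (fun d a_road => d.insert a_road none)
              (PySem.Dict.empty : PySem.Dict String (Option String))).items

-- ===== PORT B =====

def get_forefather_roads_alt (road : String) : List (String × Option String) :=
  let nodes := (PySem.Str.split? road ",").getD []   -- sep "," ≠ "", so split? is always some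
  ((PySem.List.pyRange ((nodes.length : Int) - 1) 0 (-1)).foldl
      (fun d i => d.insert (PySem.Str.join "," (PySem.List.slice nodes none (some i))) none)
      (PySem.Dict.empty : PySem.Dict String (Option String))).items

-- ===== PRECONDITION & SPEC =====

-- Pre_ excludes exactly the roads beginning with the delimiter ',': there A's first get_road call
-- drops the leading empty node, the reconstructed road differs from the input, and A raises
-- ForeFatherException.
def Pre_get_forefather_roads (road : String) : Prop :=
  PySem.Str.startswith road "," = false
instance (road : String) : Decidable (Pre_get_forefather_roads road) := by
  unfold Pre_get_forefather_roads; infer_instance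

def pvWitness_get_forefather_roads : String := "a,b"

def Spec_get_forefather_roads (road : String) (out : List (String × Option String)) : Prop :=
  out = get_forefather_roads_alt road
instance (road : String) (out : List (String × Option String)) :
    Decidable (Spec_get_forefather_roads road out) := by
  unfold Spec_get_forefather_roads; infer_instance

-- ===== CLAIM (what is proved, stated in full; the proofs are below) =====
def Claim_equal_get_forefather_roads : Prop := ∀ (road : String),
  Dom_get_forefather_roads road → Pre_get_forefather_roads road →
    Spec_get_forefather_roads road (get_forefather_roads road)

-- ===== LEMMAS AND PROOFS =====

-- simple recursive model of s.split(",") on the char level (proof-only helper)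
def mySplit : List Char → List (List Char)
  | [] => [[]]
  | c :: rest =>
      if c = ',' then [] :: mySplit rest
      else (c :: (mySplit rest).headI) :: (mySplit rest).tail

theorem mySplit_ne_nil (s : List Char) : mySplit s ≠ [] := by
  cases s with
  | nil => simp [mySplit]
  | cons c rest => by_cases h : c = ',' <;> simp [mySplit, h]

theorem splitOn_go_eq (fuel : Nat) (l cur : List Char) (acc : List (List Char))
    (h : l.length < fuel) :
    PySem.Chars.splitOn.go [','] fuel l cur acc =
      acc.reverse ++ (cur.reverse ++ (mySplit l).headI) :: (mySplit l).tail := by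
  induction fuel generalizing l cur acc with
  | zero => omega
  | succ fuel ih =>
    cases l with
    | nil => simp [PySem.Chars.splitOn.go, mySplit]
    | cons c rest =>
      by_cases hc : c = ','
      · subst hc
        rw [PySem.Chars.splitOn.go]
        rw [if_pos (by simp)]
        simp only [List.length_cons, List.drop_succ_cons, List.length_nil, List.drop_zero]
        rw [ih rest [] (cur.reverse :: acc) (by simpa using Nat.lt_of_succ_lt_succ h)]
        rcases hms : mySplit rest with _ | ⟨x, xs⟩
        · exact absurd hms (mySplit_ne_nil rest)
        · simp [mySplit, hms]
      · rw [PySem.Chars.splitOn.go]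
        rw [if_neg (by simp [Ne.symm hc])]
        rw [ih rest (c :: cur) acc (by simpa using Nat.lt_of_succ_lt_succ h)]
        rcases hms : mySplit rest with _ | ⟨x, xs⟩
        · exact absurd hms (mySplit_ne_nil rest)
        · simp [mySplit, hms, hc]

theorem splitOn_comma (s : List Char) : PySem.Chars.splitOn s [','] = mySplit s := by
  rw [PySem.Chars.splitOn, splitOn_go_eq _ _ _ _ (by omega)]
  rcases hms : mySplit s with _ | ⟨x, xs⟩
  · exact absurd hms (mySplit_ne_nil s)
  · simp

theorem join_mySplit (s : List Char) : PySem.Chars.join [','] (mySplit s) = s := by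
  induction s with
  | nil => simp [mySplit, PySem.Chars.join_singleton]
  | cons c rest ih =>
    by_cases hc : c = ','
    · subst hc
      rcases hms : mySplit rest with _ | ⟨x, xs⟩
      · exact absurd hms (mySplit_ne_nil rest)
      · rw [hms] at ih
        show PySem.Chars.join [','] (mySplit (',' :: rest)) = ',' :: rest
        simp only [mySplit, hms, if_true]
        rw [PySem.Chars.join_cons_cons]
        simpa using ih
    · rcases hms : mySplit rest with _ | ⟨x, xs⟩
      · exact absurd hms (mySplit_ne_nil rest)
      · rw [hms] at ih
        simp only [mySplit, if_neg hc, hms, List.headI, List.tail]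
        cases xs with
        | nil => simp_all [PySem.Chars.join_singleton]
        | cons y ys => simp_all [PySem.Chars.join_cons_cons]

theorem headI_mySplit_eq_nil (s : List Char) (h : (mySplit s).headI = []) :
    s = [] ∨ [','].isPrefixOf s = true := by
  cases s with
  | nil => exact Or.inl rfl
  | cons c rest =>
    by_cases hc : c = ','
    · subst hc; right; simp [List.isPrefixOf]
    · simp [mySplit, hc] at h

theorem join_comma_merge (a b : List Char) (l : List (List Char)) :
    PySem.Chars.join [','] ((a ++ ',' :: b) :: l) = PySem.Chars.join [','] (a :: b :: l) := by
  cases l with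
  | nil => simp [PySem.Chars.join_singleton, PySem.Chars.join_cons_cons]
  | cons y ys => simp [PySem.Chars.join_cons_cons]

theorem toList_comma : (",":String).toList = [','] := by decide
theorem append_comma_toList (t n : String) :
    (t ++ "," ++ n).toList = t.toList ++ ',' :: n.toList := by
  simp [String.toList_append, toList_comma]
theorem append_comma_ne_empty (t n : String) : t ++ "," ++ n ≠ "" := by
  intro h
  have := congrArg String.toList h
  rw [append_comma_toList] at this
  simp at this
theorem join_merge_str (t n : String) (l : List String) :
    PySem.Str.join "," ((t ++ "," ++ n) :: l) = PySem.Str.join "," (t :: n :: l) := by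
  apply String.toList_inj.mp
  rw [PySem.Str.toList_join, PySem.Str.toList_join]
  simp only [List.map_cons, append_comma_toList, toList_comma]
  exact join_comma_merge t.toList n.toList (l.map String.toList)
theorem join_pair_str (t n : String) : PySem.Str.join "," [t, n] = t ++ "," ++ n := by
  apply String.toList_inj.mp
  rw [PySem.Str.toList_join]
  simp only [List.map_cons, List.map_nil, toList_comma, append_comma_toList]
  rw [PySem.Chars.join_cons_cons, PySem.Chars.join_singleton]
  simp
theorem range_reverse (n : Nat) : (List.range n).reverse = (List.range n).map (fun k => n - 1 - k) := by
  induction n with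
  | zero => simp
  | succ n ih =>
    conv_lhs => rw [List.range_succ]
    conv_rhs => rw [List.range_succ_eq_map]
    rw [List.reverse_append, ih]
    simp only [List.reverse_singleton, List.singleton_append, List.map_cons, List.map_map]
    congr 1
    apply List.map_congr_left
    intro k hk
    simp only [Function.comp_apply]
    have := List.mem_range.mp hk
    omega

theorem join_single_str (h : String) : PySem.Str.join "," [h] = h := by
  apply String.toList_inj.mp
  rw [PySem.Str.toList_join]
  simp [PySem.Chars.join_singleton]

theorem nodes_spec (road : String) : ∃ ns0 : List String,
    PySem.Str.split? road "," = some ns0 ∧ ns0.map String.toList = mySplit road.toList := by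
  have h := PySem.Str.split?_map road ","
  rw [toList_comma] at h
  rw [show PySem.Chars.split? road.toList [','] = some (mySplit road.toList) by
        simp [PySem.Chars.split?, splitOn_comma]] at h
  cases hs : PySem.Str.split? road "," with
  | none => rw [hs] at h; simp at h
  | some ns0 =>
      rw [hs] at h
      exact ⟨ns0, rfl, by simpa using h⟩

theorem poplast_loop_eq_reverse (l : List String) : pv_poplast_loop l = l.reverse := by
  induction l using pv_poplast_loop.induct with
  | case1 => simp [pv_poplast_loop]
  | case2 l h ih =>
    rw [pv_poplast_loop, dif_neg (by simpa using h)]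
    rw [ih]
    conv_rhs => rw [← List.dropLast_append_getLast h]
    simp

theorem step_eq (t n : String) :
    pv_get_road (some t) (some n) none none = if t = "" then n else t ++ "," ++ n := by
  rw [pv_get_road]
  simp [pv_get_road_from_road_and_node, pv_get_node_delimiter]

theorem anc_loop_eq (ns : List String) (t : String) (ht : t ≠ "") :
    pv_anc_loop t ns =
      (List.range ns.length).map (fun k => PySem.Str.join "," (t :: ns.take (k + 1))) := by
  induction ns generalizing t with
  | nil => simp [pv_anc_loop]
  | cons n rest ih =>
    have hstep : pv_get_road (some t) (some n) none none = t ++ "," ++ n := by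
      rw [step_eq, if_neg ht]
    rw [pv_anc_loop]
    simp only [hstep]
    rw [ih _ (append_comma_ne_empty t n)]
    rw [List.length_cons, List.range_succ_eq_map]
    simp only [List.map_cons, List.map_map]
    congr 1
    · rw [show List.take (0 + 1) (n :: rest) = [n] by simp, join_pair_str]
    · apply List.map_congr_left
      intro k _
      simp only [Function.comp_apply, List.take_succ_cons]
      rw [join_merge_str]

-- ===== VERDICT (by name: the statement is the Claim_ definition above) =====
theorem get_forefather_roads_spec : Claim_equal_get_forefather_roads := by
  intro road _ hpre
  unfold Spec_get_forefather_roads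
  obtain ⟨ns0, hsplit, hmap⟩ := nodes_spec road
  have hpre' : [','].isPrefixOf road.toList = false := by
    have := hpre
    unfold Pre_get_forefather_roads at this
    rw [PySem.Str.startswith_eq, toList_comma] at this
    simpa [PySem.Chars.startswith] using this
  cases ns0 with
  | nil => exact absurd (by simpa using hmap.symm) (mySplit_ne_nil road.toList)
  | cons h ns =>
    by_cases hh : h = ""
    · -- first node empty: under Pre_ the road itself is empty and both sides are []
      subst hh
      have hhead : (mySplit road.toList).headI = [] := by
        rw [← hmap]; rfl
      rcases headI_mySplit_eq_nil road.toList hhead with hnil | hpref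
      · have hroad : road = "" := String.toList_inj.mp (by simpa using hnil)
        have hns : ns = [] := by
          have hlen := congrArg List.length hmap
          rw [hnil] at hlen
          simpa [mySplit] using hlen
        subst hroad; subst hns
        rw [get_forefather_roads]
        unfold pv_get_ancestor_roads pv_get_all_road_nodes pv_get_node_delimiter
        rw [hsplit]
        simp only [Option.getD_some, pv_anc_loop]
        rw [poplast_loop_eq_reverse]
        simp only [List.reverse_singleton]
        rw [if_neg (not_not_intro rfl), List.foldl_nil]
        unfold get_forefather_roads_alt
        rw [hsplit]
        simp only [Option.getD_some, List.length_cons, List.length_nil]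
        rw [PySem.List.pyRange_neg_one_eq_nil (by omega)]
        simp
      · rw [hpref] at hpre'; exact absurd hpre' (by simp)
    · -- general case: the first node is nonempty
      set n := ns.length with hn
      set g : Nat → String := fun k => PySem.Str.join "," ((h :: ns).take (k + 1)) with hg
      have hall : h :: pv_anc_loop h ns = (List.range (n + 1)).map g := by
        rw [anc_loop_eq ns h hh]
        conv_rhs => rw [List.range_succ_eq_map]
        simp only [List.map_cons, List.map_map]
        congr 1
        · simp [hg, join_single_str]
      have hjoinnodes : PySem.Str.join "," (h :: ns) = road := by
        apply String.toList_inj.mp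
        rw [PySem.Str.toList_join, toList_comma]
        rw [show (h :: ns).map String.toList = mySplit road.toList from hmap]
        exact join_mySplit road.toList
      have hgn : g n = road := by
        rw [hg]
        simp only
        rw [show (h :: ns).take (n + 1) = h :: ns by
          apply List.take_of_length_le; simp [hn]]
        exact hjoinnodes
      have hrev : ((List.range (n + 1)).map g).reverse
          = g n :: (List.range n).map (fun k => g (n - 1 - k)) := by
        rw [← List.map_reverse, range_reverse]
        conv_lhs => rw [List.range_succ_eq_map]
        simp only [List.map_cons, List.map_map]
        congr 1
        apply List.map_congr_left
        intro k hk
        have := List.mem_range.mp hk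
        simp only [Function.comp_apply]
        exact congrArg g (by omega)
      have hanc : pv_get_ancestor_roads road =
          road :: (List.range n).map (fun k => g (n - 1 - k)) := by
        unfold pv_get_ancestor_roads pv_get_all_road_nodes pv_get_node_delimiter
        rw [hsplit]
        simp only [Option.getD_some]
        rw [poplast_loop_eq_reverse, hall, hrev, hgn]
      have hkeysB : (PySem.List.pyRange ((((h :: ns).length : Int)) - 1) 0 (-1)).map
            (fun i => PySem.Str.join "," (PySem.List.slice (h :: ns) none (some i)))
          = (List.range n).map (fun k => g (n - 1 - k)) := by
        rw [show (((h :: ns).length : Int)) - 1 = (n : Int) by simp [hn]]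
        rw [PySem.List.pyRange_neg_one]
        rw [show ((n : Int) - 0).toNat = n by omega]
        rw [List.map_map]
        apply List.map_congr_left
        intro k hk
        have hk' := List.mem_range.mp hk
        simp only [Function.comp_apply]
        rw [PySem.List.slice_to (h :: ns) (by omega : (0:Int) ≤ (n : Int) - (k : Int))]
        rw [show ((n : Int) - (k : Int)).toNat = (n - 1 - k) + 1 by omega]
      rw [get_forefather_roads, hanc]
      unfold get_forefather_roads_alt
      rw [hsplit]
      simp only [Option.getD_some]
      rw [← hkeysB, List.foldl_map]
      simp
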